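-- pv_equiv track=rewrite | github.com/lanl/Quantum-Telecloning | utils.py | remove_measurements_from_qasm_string
-- ===== SOURCE A (Python) =====
-- def remove_measurements_from_qasm_string(QASM):
-- 	split_str = QASM.split("\n")
-- 	original = []
-- 	split_str.reverse()
-- 	barrier_removed_count = 0
-- 	measure_removed_count = 0
-- 	for line in split_str:
-- 		if "barrier" in line:
-- 			if barrier_removed_count < 1:
-- 				barrier_removed_count += 1
-- 				continue
-- 		if "measure" in line:
-- 			if measure_removed_count < 2:
-- 				measure_removed_count += 1
-- 				continue
-- 		original.append(line)
-- 	original.reverse()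
-- 	output_qasm = ""
-- 	for a in original:
-- 		output_qasm += a+"\n"
-- 	return output_qasm
-- ===== SOURCE B (Python) =====
-- def remove_measurements_from_qasm_string(QASM):
--     lines = QASM.split("\n")
--     b_idx = [i for i, line in enumerate(lines) if "barrier" in line]
--     drop = set(b_idx[-1:])
--     m_idx = [i for i, line in enumerate(lines) if "measure" in line and i not in drop]
--     drop.update(m_idx[-2:])
--     return "".join(line + "\n" for i, line in enumerate(lines) if i not in drop)
-- ===== Notes on version B (the rewrite author's own statement) =====
-- stated objective: alternative
-- what changed: Replaces A's reversed single pass with two mutating counters by a forward index-based decomposition: collect the indices of barrier lines and of measure lines (excluding the dropped barrier line), build a drop-set from the last barrier index and the last two measure indices, and join the surviving lines in one comprehension.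
import Mathlib
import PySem

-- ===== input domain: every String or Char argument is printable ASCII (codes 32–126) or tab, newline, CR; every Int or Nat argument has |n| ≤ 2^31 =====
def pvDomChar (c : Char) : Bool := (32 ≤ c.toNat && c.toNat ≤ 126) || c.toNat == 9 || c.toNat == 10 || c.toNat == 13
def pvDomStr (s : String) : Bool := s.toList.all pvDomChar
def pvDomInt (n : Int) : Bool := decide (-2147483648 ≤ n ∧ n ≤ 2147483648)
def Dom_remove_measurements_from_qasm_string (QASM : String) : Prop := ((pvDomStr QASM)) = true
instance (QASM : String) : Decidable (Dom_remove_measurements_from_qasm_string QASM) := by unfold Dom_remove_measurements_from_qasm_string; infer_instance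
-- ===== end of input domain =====

-- B replaces A's reversed single pass with two counters by a forward index-based
-- decomposition (drop-set of the last barrier index and last two measure indices);
-- objective: alternative (same cost, different structure).

-- ===== PORT A =====
def remove_measurements_from_qasm_string (QASM : String) : String :=
  let split_str := (PySem.Str.split? QASM "\n").getD []
  let st := split_str.reverse.foldl
    (fun (acc : List String × Nat × Nat) line =>
      if PySem.Str.isIn "barrier" line && decide (acc.2.1 < 1) then (acc.1, acc.2.1 + 1, acc.2.2)
      else if PySem.Str.isIn "measure" line && decide (acc.2.2 < 2) then (acc.1, acc.2.1, acc.2.2 + 1)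
      else (acc.1 ++ [line], acc.2.1, acc.2.2))
    ([], 0, 0)
  let original := st.1.reverse
  original.foldl (fun out a => out ++ (a ++ "\n")) ""

-- ===== PORT B =====
def remove_measurements_from_qasm_string_alt (QASM : String) : String :=
  let lines := (PySem.Str.split? QASM "\n").getD []
  let e := PySem.List.enumerate lines
  let b_idx := (e.filter (fun p => PySem.Str.isIn "barrier" p.2)).map (fun p => p.1)
  let drop : PySem.Set Int := PySem.Set.ofList (PySem.List.slice b_idx (some (-1)))
  let m_idx := (e.filter (fun p =>
      PySem.Str.isIn "measure" p.2 && !(PySem.Set.contains drop p.1))).map (fun p => p.1)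
  let drop2 := PySem.Set.update drop (PySem.List.slice m_idx (some (-2)))
  PySem.Str.join "" ((e.filter (fun p => !(PySem.Set.contains drop2 p.1))).map (fun p => p.2 ++ "\n"))

-- ===== PRECONDITION & SPEC =====
def Spec_remove_measurements_from_qasm_string (QASM : String) (out : String) : Prop := out = remove_measurements_from_qasm_string_alt QASM
instance (QASM : String) (out : String) : Decidable (Spec_remove_measurements_from_qasm_string QASM out) := by unfold Spec_remove_measurements_from_qasm_string; infer_instance

-- ===== CLAIM (what is proved, stated in full; the proofs are below) =====
def Claim_equal_remove_measurements_from_qasm_string : Prop := ∀ (QASM : String), Dom_remove_measurements_from_qasm_string QASM → Spec_remove_measurements_from_qasm_string QASM (remove_measurements_from_qasm_string QASM)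

-- ===== LEMMAS AND PROOFS =====

-- drop the first k elements satisfying p (Python "remove while a counter lasts")
def pvDropFN {α : Type} (p : α → Bool) : Nat → List α → List α
  | _, [] => []
  | 0, xs => xs
  | k+1, x :: t => if p x then pvDropFN p k t else x :: pvDropFN p (k+1) t

@[simp] lemma pvDropFN_nil {α : Type} (p : α → Bool) (k : Nat) : pvDropFN p k [] = [] := by
  cases k <;> rfl

@[simp] lemma pvDropFN_zero {α : Type} (p : α → Bool) (xs : List α) : pvDropFN p 0 xs = xs := by
  cases xs <;> rfl

lemma pvDropFN_succ_cons {α : Type} (p : α → Bool) (k : Nat) (x : α) (t : List α) :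
    pvDropFN p (k+1) (x :: t) = if p x then pvDropFN p k t else x :: pvDropFN p (k+1) t := rfl

-- the kept lines of A's loop, as a recursion with the two counters
def pvKeep : Nat → Nat → List String → List String
  | _, _, [] => []
  | b, m, l :: t =>
    if PySem.Str.isIn "barrier" l && decide (b < 1) then pvKeep (b+1) m t
    else if PySem.Str.isIn "measure" l && decide (m < 2) then pvKeep b (m+1) t
    else l :: pvKeep b m t

lemma pvKeep_cons (b m : Nat) (l : String) (t : List String) :
    pvKeep b m (l :: t)
      = if PySem.Str.isIn "barrier" l && decide (b < 1) then pvKeep (b+1) m t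
        else if PySem.Str.isIn "measure" l && decide (m < 2) then pvKeep b (m+1) t
        else l :: pvKeep b m t := rfl

lemma pvFoldA (rs : List String) : ∀ (orig : List String) (b m : Nat),
    (rs.foldl
      (fun (acc : List String × Nat × Nat) line =>
        if PySem.Str.isIn "barrier" line && decide (acc.2.1 < 1) then (acc.1, acc.2.1 + 1, acc.2.2)
        else if PySem.Str.isIn "measure" line && decide (acc.2.2 < 2) then (acc.1, acc.2.1, acc.2.2 + 1)
        else (acc.1 ++ [line], acc.2.1, acc.2.2))
      (orig, b, m)).1 = orig ++ pvKeep b m rs := by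
  induction rs with
  | nil => intro orig b m; simp [pvKeep]
  | cons l t ih =>
    intro orig b m
    simp only [List.foldl_cons]
    by_cases h1 : (PySem.Str.isIn "barrier" l && decide (b < 1)) = true
    · simp only [h1, if_true]
      rw [ih, pvKeep_cons, if_pos h1]
    · by_cases h2 : (PySem.Str.isIn "measure" l && decide (m < 2)) = true
      · simp only [if_neg h1, if_pos h2]
        rw [ih, pvKeep_cons, if_neg h1, if_pos h2]
      · simp only [if_neg h1, if_neg h2]
        rw [ih, pvKeep_cons, if_neg h1, if_neg h2]
        simp

lemma pvKeep_one (rs : List String) : ∀ m, pvKeep 1 m rs = pvDropFN (PySem.Str.isIn "measure") (2-m) rs := by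
  induction rs with
  | nil => intro m; simp [pvKeep]
  | cons l t ih =>
    intro m
    have hb : (PySem.Str.isIn "barrier" l && decide ((1:Nat) < 1)) = false := by simp
    by_cases hm : m < 2
    · obtain ⟨k, hk⟩ : ∃ k, 2 - m = k + 1 := ⟨1 - m, by omega⟩
      have hk2 : 2 - (m + 1) = k := by omega
      by_cases hM : PySem.Str.isIn "measure" l = true
      · simp only [pvKeep, hb, Bool.false_eq_true, if_false, hM, hm, decide_true, Bool.and_true,
          hk, pvDropFN_succ_cons, if_pos]
        rw [ih, hk2]
      · simp only [pvKeep, hb, Bool.false_eq_true, if_false, hM, Bool.false_and, hk,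
          pvDropFN_succ_cons]
        rw [ih, hk]
    · have h0 : 2 - m = 0 := by omega
      have hmf : decide (m < 2) = false := by simpa using hm
      simp only [pvKeep, hb, Bool.false_eq_true, if_false, hmf, Bool.and_false, h0, pvDropFN_zero]
      rw [ih, h0, pvDropFN_zero]

lemma pvKeep_zero (rs : List String) : ∀ m, pvKeep 0 m rs
    = pvDropFN (PySem.Str.isIn "measure") (2-m) (pvDropFN (PySem.Str.isIn "barrier") 1 rs) := by
  induction rs with
  | nil => intro m; simp [pvKeep]
  | cons l t ih =>
    intro m
    by_cases hB : PySem.Str.isIn "barrier" l = true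
    · simp only [pvKeep, hB, pvDropFN_succ_cons, if_pos,
        pvDropFN_zero]
      exact pvKeep_one t m
    · have hd : pvDropFN (PySem.Str.isIn "barrier") 1 (l :: t)
          = l :: pvDropFN (PySem.Str.isIn "barrier") 1 t := by
        rw [pvDropFN_succ_cons, if_neg]; simpa using hB
      by_cases hm : m < 2
      · obtain ⟨k, hk⟩ : ∃ k, 2 - m = k + 1 := ⟨1 - m, by omega⟩
        have hk2 : 2 - (m + 1) = k := by omega
        by_cases hM : PySem.Str.isIn "measure" l = true
        · simp only [pvKeep, hB, Bool.false_and, Bool.false_eq_true, if_false, hM, hm,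
            decide_true, Bool.and_true, hd, hk, pvDropFN_succ_cons, if_pos]
          rw [ih, hk2]
        · simp only [pvKeep, hB, Bool.false_and, Bool.false_eq_true, if_false, hM, hd, hk,
            pvDropFN_succ_cons]
          rw [ih, hk]
      · have h0 : 2 - m = 0 := by omega
        have hmf : decide (m < 2) = false := by simpa using hm
        simp only [pvKeep, hB, Bool.false_and, Bool.false_eq_true, if_false, hmf, Bool.and_false,
          hd, h0, pvDropFN_zero]
        rw [ih, h0, pvDropFN_zero]

lemma pvMapSnd_dropFN (p : String → Bool) : ∀ (k : Nat) (q : List (Int × String)),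
    List.map (fun x => x.2) (pvDropFN (fun x => p x.2) k q) = pvDropFN p k (q.map (fun x => x.2)) := by
  intro k q
  induction q generalizing k with
  | nil => simp
  | cons x t ih =>
    cases k with
    | zero => simp
    | succ k' =>
      by_cases h : p x.2
      · simp [pvDropFN_succ_cons, h, ih]
      · simp [pvDropFN_succ_cons, h, ih]

-- central: filtering away (the indices of) the first k p-hits equals pvDropFN, on fst-nodup pair lists
lemma pvFilter_take (p : String → Bool) : ∀ (r : List (Int × String)) (k : Nat),
    (r.map (fun x => x.1)).Nodup →
    r.filter (fun x => !(((r.filter (fun y => p y.2)).map (fun y => y.1)).take k).contains x.1)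
      = pvDropFN (fun y => p y.2) k r := by
  intro r
  induction r with
  | nil => intro k _; simp
  | cons x t ih =>
    intro k hnd
    rw [List.map_cons, List.nodup_cons] at hnd
    obtain ⟨hx, hndt⟩ := hnd
    have hsub : ((t.filter (fun y => p y.2)).map (fun y : Int × String => y.1)).Sublist
        (t.map (fun y : Int × String => y.1)) :=
      List.Sublist.map (fun y : Int × String => y.1) List.filter_sublist
    have hsubT : ∀ z, z ∈ (t.filter (fun y => p y.2)).map (fun y : Int × String => y.1) →
        z ∈ t.map (fun y : Int × String => y.1) := fun z hz => hsub.mem hz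
    cases k with
    | zero => simp
    | succ k' =>
      by_cases hp : p x.2 = true
      · rw [show (x :: t).filter (fun y => p y.2) = x :: t.filter (fun y => p y.2) from
            List.filter_cons_of_pos hp]
        rw [List.map_cons, List.take_succ_cons]
        rw [List.filter_cons_of_neg (by simp), pvDropFN_succ_cons, if_pos hp]
        rw [← ih k' hndt]
        apply List.filter_congr
        intro y hy
        have hne : (y.1 == x.1) = false := by
          refine beq_eq_false_iff_ne.mpr ?_
          intro hEq
          exact hx (hEq ▸ List.mem_map_of_mem hy)
        simp only [List.contains_cons, hne, Bool.false_or]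
      · rw [show (x :: t).filter (fun y => p y.2) = t.filter (fun y => p y.2) from
            List.filter_cons_of_neg (by simpa using hp)]
        have hxnot : x.1 ∉ ((t.filter (fun y => p y.2)).map (fun y : Int × String => y.1)).take (k'+1) := by
          intro hmem
          exact hx (hsubT _ (List.mem_of_mem_take hmem))
        rw [List.filter_cons_of_pos (by simpa using hxnot), pvDropFN_succ_cons,
          if_neg (by simpa using hp)]
        rw [ih (k'+1) hndt]

-- Bool bridge: membership in a PySem.Set built from a list is plain list containment
lemma pvOfListContains (s : List Int) (x : Int) :
    PySem.Set.contains (PySem.Set.ofList s) x = s.contains x := by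
  rw [Bool.eq_iff_iff]
  simp [PySem.Set.contains, PySem.Set.mem_ofList]

lemma pvUpdateContains (s : PySem.Set Int) (l : List Int) (x : Int) :
    PySem.Set.contains (PySem.Set.update s l) x = (PySem.Set.contains s x || l.contains x) := by
  rw [Bool.eq_iff_iff]
  simp [PySem.Set.contains, PySem.Set.mem_update]

-- one removal pass, stated on the forward list: filtering out the drop-(len-k) suffix of the
-- hit indices equals pvDropFN with budget k on the reversed list
lemma pvPass (p : String → Bool) (e : List (Int × String)) (k : Nat)
    (hnd : (e.map (fun x => x.1)).Nodup) (S : List Int)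
    (hS : S = ((e.filter (fun y => p y.2)).map (fun y => y.1)).drop
            (((e.filter (fun y => p y.2)).map (fun y => y.1)).length - k)) :
    e.filter (fun x => !(S.contains x.1)) = (pvDropFN (fun y => p y.2) k e.reverse).reverse := by
  have hndr : (e.reverse.map (fun x => x.1)).Nodup := by
    rw [List.map_reverse, List.nodup_reverse]; exact hnd
  have h := pvFilter_take p e.reverse k hndr
  rw [List.filter_reverse] at h
  rw [← h, List.reverse_reverse]
  apply List.filter_congr
  intro x _
  congr 1
  rw [Bool.eq_iff_iff]
  have hTS : ∀ z : Int,
      z ∈ ((e.reverse.filter (fun y => p y.2)).map (fun y => y.1)).take k ↔ z ∈ S := by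
    intro z
    rw [List.filter_reverse, List.map_reverse, List.take_reverse, List.mem_reverse, hS]
  simp only [List.contains_iff_mem]
  exact (hTS x.1).symm

lemma pvJoin_cons (x : String) (xs : List String) :
    PySem.Str.join "" (x :: xs) = x ++ PySem.Str.join "" xs := by
  apply String.toList_inj.mp
  cases xs <;>
    simp [PySem.Str.toList_join, String.toList_append, PySem.Chars.join, List.intercalate]

lemma pvFold_join (l : List String) :
    l.foldl (fun out a => out ++ (a ++ "\n")) "" = PySem.Str.join "" (l.map (· ++ "\n")) := by
  have gen : ∀ (l : List String) (s : String),
      l.foldl (fun out a => out ++ (a ++ "\n")) s = s ++ PySem.Str.join "" (l.map (· ++ "\n")) := by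
    intro l
    induction l with
    | nil =>
      intro s
      apply String.toList_inj.mp
      simp [PySem.Str.toList_join, String.toList_append, PySem.Chars.join, List.intercalate]
    | cons x t ih =>
      intro s
      rw [List.foldl_cons, ih, List.map_cons, pvJoin_cons]
      apply String.toList_inj.mp
      simp
  have h := gen l ""
  rw [h]
  apply String.toList_inj.mp
  simp

theorem pvMain (ls : List String) :
    (((ls.reverse.foldl
      (fun (acc : List String × Nat × Nat) line =>
        if PySem.Str.isIn "barrier" line && decide (acc.2.1 < 1) then (acc.1, acc.2.1 + 1, acc.2.2)
        else if PySem.Str.isIn "measure" line && decide (acc.2.2 < 2) then (acc.1, acc.2.1, acc.2.2 + 1)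
        else (acc.1 ++ [line], acc.2.1, acc.2.2))
      ([], 0, 0)).1.reverse).foldl (fun out a => out ++ (a ++ "\n")) "")
    = PySem.Str.join ""
        (((PySem.List.enumerate ls).filter (fun p =>
            !(PySem.Set.contains
              (PySem.Set.update
                (PySem.Set.ofList (PySem.List.slice
                  (((PySem.List.enumerate ls).filter (fun p => PySem.Str.isIn "barrier" p.2)).map (fun p => p.1))
                  (some (-1))))
                (PySem.List.slice
                  (((PySem.List.enumerate ls).filter (fun p =>
                      PySem.Str.isIn "measure" p.2 &&
                      !(PySem.Set.contains
                        (PySem.Set.ofList (PySem.List.slice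
                          (((PySem.List.enumerate ls).filter (fun p => PySem.Str.isIn "barrier" p.2)).map (fun p => p.1))
                          (some (-1)))) p.1))).map (fun p => p.1))
                  (some (-2)))) p.1))).map (fun p => p.2 ++ "\n")) := by
  have nd : ((PySem.List.enumerate ls).map (fun x : Int × String => x.1)).Nodup :=
    ((List.pairwise_map.mpr (PySem.List.pairwise_lt_enumerate ls 0)).imp (fun h => ne_of_lt h))
  rw [pvFoldA ls.reverse [] 0 0, List.nil_append, pvKeep_zero ls.reverse 0, Nat.sub_zero,
    pvFold_join]
  rw [PySem.List.slice_from_neg_one, PySem.List.slice_from_neg_ofNat _ 2 (by norm_num)]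
  set e := PySem.List.enumerate ls with hE
  set Hb := (e.filter (fun p => PySem.Str.isIn "barrier" p.2)).map (fun p => p.1) with hHb
  set S1 := Hb.drop (Hb.length - 1) with hS1
  set Mf := e.filter (fun p => PySem.Str.isIn "measure" p.2 &&
      !(PySem.Set.contains (PySem.Set.ofList S1) p.1)) with hMf
  set S2 := (Mf.map (fun p => p.1)).drop ((Mf.map (fun p => p.1)).length - 2) with hS2
  have he1 : e.filter (fun x => !(S1.contains x.1))
      = (pvDropFN (fun y => PySem.Str.isIn "barrier" y.2) 1 e.reverse).reverse :=
    pvPass (PySem.Str.isIn "barrier") e 1 nd S1 (by rw [hS1, hHb])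
  have nd1 : ((e.filter (fun x => !(S1.contains x.1))).map (fun x : Int × String => x.1)).Nodup :=
    List.Nodup.sublist (List.Sublist.map _ List.filter_sublist) nd
  have hm : Mf = (e.filter (fun x => !(S1.contains x.1))).filter
      (fun p => PySem.Str.isIn "measure" p.2) := by
    rw [hMf, List.filter_filter]
    apply List.filter_congr
    intro x _
    rw [pvOfListContains]
  have he2 : (e.filter (fun x => !(S1.contains x.1))).filter (fun x => !(S2.contains x.1))
      = (pvDropFN (fun y => PySem.Str.isIn "measure" y.2) 2
          (e.filter (fun x => !(S1.contains x.1))).reverse).reverse :=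
    pvPass (PySem.Str.isIn "measure") (e.filter (fun x => !(S1.contains x.1))) 2 nd1 S2
      (by rw [hS2, hm])
  have hkept : e.filter (fun p =>
        !(PySem.Set.contains (PySem.Set.update (PySem.Set.ofList S1) S2) p.1))
      = (e.filter (fun x => !(S1.contains x.1))).filter (fun x => !(S2.contains x.1)) := by
    rw [List.filter_filter]
    apply List.filter_congr
    intro x _
    rw [pvUpdateContains, pvOfListContains]
    cases S1.contains x.1 <;> cases S2.contains x.1 <;> rfl
  rw [hkept, he2]
  have hsnd : (fun p : Int × String => p.2 ++ "\n")
      = (fun a : String => a ++ "\n") ∘ (fun p : Int × String => p.2) := rfl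
  rw [hsnd, ← List.map_map]
  congr 1
  congr 1
  rw [List.map_reverse, pvMapSnd_dropFN, List.map_reverse, he1, List.map_reverse,
    List.reverse_reverse, pvMapSnd_dropFN, List.map_reverse, hE,
    PySem.List.map_snd_enumerate]

-- ===== VERDICT (by name: the statement is the Claim_ definition above) =====
theorem remove_measurements_from_qasm_string_spec : Claim_equal_remove_measurements_from_qasm_string := by
  intro QASM _
  show remove_measurements_from_qasm_string QASM = remove_measurements_from_qasm_string_alt QASM
  exact pvMain ((PySem.Str.split? QASM "\n").getD [])
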